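-- pv_equiv track=rewrite | github.com/PLSE-Lab/Python-MLAPI-expl | python_sources/arc-list-method.py | check_belongs_to
-- ===== SOURCE A (Python) =====
-- def check_belongs_to(l1,l2):
--     r = 0
--     for z in l1:
--         for x in l2:
--             if x[0] == z[0] and x[1] == z[1]:
--                 r += 1
--     if r == len(l1):
--         return(True)
--     else:
--         return(False)
-- ===== SOURCE B (Python) =====
-- def check_belongs_to(l1, l2):
--     c1 = {}
--     for z in l1:
--         k = (z[0], z[1])
--         c1[k] = c1.get(k, 0) + 1
--     c2 = {}
--     for x in l2:
--         k = (x[0], x[1])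
--         c2[k] = c2.get(k, 0) + 1
--     r = 0
--     for k, n in c1.items():
--         r += n * c2.get(k, 0)
--     return r == len(l1)
-- ===== Notes on version B (the rewrite author's own statement) =====
-- stated objective: alternative
-- what changed: Replaces the nested all-pairs comparison loop with two frequency dictionaries keyed by (first, second) coordinate and a single pass over the distinct keys computing the inner product of the two frequency maps.
-- outside the precondition, e.g. on check_belongs_to([[1, 2]], [[3]]): A returns False, B raises IndexError; on check_belongs_to([], [[1]]): A returns True, B raises IndexError
import Mathlib
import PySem

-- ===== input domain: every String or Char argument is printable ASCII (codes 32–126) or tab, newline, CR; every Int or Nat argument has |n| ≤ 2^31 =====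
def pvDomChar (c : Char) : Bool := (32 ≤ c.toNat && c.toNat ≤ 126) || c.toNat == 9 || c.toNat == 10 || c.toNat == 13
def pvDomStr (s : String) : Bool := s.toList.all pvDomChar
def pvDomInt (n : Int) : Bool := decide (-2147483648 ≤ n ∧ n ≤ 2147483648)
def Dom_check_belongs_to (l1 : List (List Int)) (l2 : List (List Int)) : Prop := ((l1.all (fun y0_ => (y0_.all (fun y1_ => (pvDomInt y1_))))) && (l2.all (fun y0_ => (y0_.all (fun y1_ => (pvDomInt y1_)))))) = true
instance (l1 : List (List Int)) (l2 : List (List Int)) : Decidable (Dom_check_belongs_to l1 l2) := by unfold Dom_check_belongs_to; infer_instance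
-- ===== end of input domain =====

-- B replaces A's nested all-pairs comparison loop with two (key -> count) frequency
-- dictionaries and a single inner-product pass over the distinct keys.


-- ===== PORT A =====
def check_belongs_to (l1 : List (List Int)) (l2 : List (List Int)) : Bool :=
  let r : Int := l1.foldl (fun r z =>
    l2.foldl (fun r x =>
      if PySem.List.pyGet? x 0 = PySem.List.pyGet? z 0 ∧ PySem.List.pyGet? x 1 = PySem.List.pyGet? z 1
      then r + 1 else r) r) 0
  decide (r = (l1.length : Int))

-- ===== PORT B =====
-- k = (z[0], z[1]); exact inside Pre_ (both indices exist there; Python raises otherwise)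
def pvKey (z : List Int) : Option Int × Option Int :=
  (PySem.List.pyGet? z 0, PySem.List.pyGet? z 1)

def check_belongs_to_alt (l1 : List (List Int)) (l2 : List (List Int)) : Bool :=
  let c1 : PySem.Dict (Option Int × Option Int) Int :=
    l1.foldl (fun d z => d.insert (pvKey z) (d.getD (pvKey z) 0 + 1)) PySem.Dict.empty
  let c2 : PySem.Dict (Option Int × Option Int) Int :=
    l2.foldl (fun d x => d.insert (pvKey x) (d.getD (pvKey x) 0 + 1)) PySem.Dict.empty
  let r : Int := c1.items.foldl (fun s p => s + p.2 * c2.getD p.1 0) 0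
  decide (r = (l1.length : Int))

-- ===== PRECONDITION & SPEC =====
-- Pre_ excludes inputs containing an inner list of length < 2: on most of them Python A raises
-- IndexError, and on the few where A still returns (the short index is never reached: empty l1/l2,
-- or the first coordinates differ so x[1] is never read) B raises IndexError building its key.
def Pre_check_belongs_to (l1 : List (List Int)) (l2 : List (List Int)) : Prop :=
  (∀ z ∈ l1, 2 ≤ z.length) ∧ (∀ x ∈ l2, 2 ≤ x.length)
instance (l1 : List (List Int)) (l2 : List (List Int)) : Decidable (Pre_check_belongs_to l1 l2) := by unfold Pre_check_belongs_to; infer_instance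
def pvWitness_check_belongs_to : List (List Int) × List (List Int) := ([[1, 2]], [[1, 2], [3, 4]])

def Spec_check_belongs_to (l1 : List (List Int)) (l2 : List (List Int)) (out : Bool) : Prop := out = check_belongs_to_alt l1 l2
instance (l1 : List (List Int)) (l2 : List (List Int)) (out : Bool) : Decidable (Spec_check_belongs_to l1 l2 out) := by unfold Spec_check_belongs_to; infer_instance

-- ===== CLAIM (what is proved, stated in full; the proofs are below) =====
def Claim_equal_check_belongs_to : Prop := ∀ (l1 : List (List Int)) (l2 : List (List Int)), Dom_check_belongs_to l1 l2 → Pre_check_belongs_to l1 l2 → Spec_check_belongs_to l1 l2 (check_belongs_to l1 l2)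

-- ===== LEMMAS AND PROOFS =====

-- Σ_{k ∈ s} (if k = a then f k else 0) = f a, for a ∈ s with s duplicate-free.
theorem pv_sum_indicator {α : Type} [DecidableEq α] [BEq α] [LawfulBEq α] (s : List α) (a : α) (f : α → Int)
    (hnd : s.Nodup) (ha : a ∈ s) :
    (s.map (fun k => if k = a then f k else 0)).sum = f a := by
  induction s with
  | nil => cases ha
  | cons b t ih =>
    rcases List.mem_cons.mp ha with h | h
    · subst h
      have : (t.map (fun k => if k = a then f k else 0)).sum = 0 := by
        apply List.sum_eq_zero
        intro x hx
        rcases List.mem_map.mp hx with ⟨k, hk, rfl⟩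
        have : k ≠ a := fun h => (List.nodup_cons.mp hnd).1 (h ▸ hk)
        simp [this]
      simp [this]
    · have hb : b ≠ a := fun hba => (List.nodup_cons.mp hnd).1 (hba ▸ h)
      simp [hb, ih (List.nodup_cons.mp hnd).2 h]

-- grouped inner product = plain sum over u: Σ_{k ∈ s} count_u(k) · f k = Σ_{a ∈ u} f a
theorem pv_sum_count_mul {α : Type} [DecidableEq α] [BEq α] [LawfulBEq α] (u : List α) (s : List α) (f : α → Int)
    (hnd : s.Nodup) (hsub : ∀ a ∈ u, a ∈ s) :
    (s.map (fun k => (u.count k : Int) * f k)).sum = (u.map f).sum := by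
  induction u with
  | nil => simp
  | cons a t ih =>
    have h1 : (s.map (fun k => ((a :: t).count k : Int) * f k)).sum
        = (s.map (fun k => (t.count k : Int) * f k + (if k = a then f k else 0))).sum := by
      apply congrArg
      apply List.map_congr_left
      intro k _
      by_cases hk : k = a
      · subst hk
        push_cast [List.count_cons]
        simp
        ring
      · simp [List.count_cons, hk]
        exact Or.inl (fun hak => hk hak.symm)
    rw [h1, PySem.List.sum_map_add_int, ih (fun x hx => hsub x (List.mem_cons_of_mem a hx)),
        pv_sum_indicator s a f hnd (hsub a (List.mem_cons_self))]
    simp [add_comm]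

theorem pv_count_map (l2 : List (List Int)) (z : List Int) :
    (l2.countP (fun x => decide (pvKey x = pvKey z)) : Int) = ((l2.map pvKey).count (pvKey z) : Int) := by
  have : (l2.map pvKey).count (pvKey z) = l2.countP (fun x => decide (pvKey x = pvKey z)) := by
    rw [List.count, List.countP_map]
    apply List.countP_congr
    intro x _
    simp
  rw [this]

theorem pv_main_eq (l1 l2 : List (List Int)) :
    check_belongs_to l1 l2 = check_belongs_to_alt l1 l2 := by
  unfold check_belongs_to check_belongs_to_alt
  have hinner : ∀ (r : Int) (z : List Int), l2.foldl (fun r x =>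
      if PySem.List.pyGet? x 0 = PySem.List.pyGet? z 0 ∧ PySem.List.pyGet? x 1 = PySem.List.pyGet? z 1
      then r + 1 else r) r = r + ((l2.map pvKey).count (pvKey z) : Int) := by
    intro r z
    have hfun : (fun (r : Int) x => if PySem.List.pyGet? x 0 = PySem.List.pyGet? z 0 ∧ PySem.List.pyGet? x 1 = PySem.List.pyGet? z 1 then r + 1 else r)
        = (fun (r : Int) x => if pvKey x = pvKey z then r + 1 else r) := by
      funext r x
      simp only [pvKey, Prod.mk.injEq]
    rw [hfun, PySem.List.foldl_ite_add_one, pv_count_map]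
  have hA : (l1.foldl (fun r z =>
      l2.foldl (fun r x =>
        if PySem.List.pyGet? x 0 = PySem.List.pyGet? z 0 ∧ PySem.List.pyGet? x 1 = PySem.List.pyGet? z 1
        then r + 1 else r) r) (0 : Int))
      = ((l1.map pvKey).map (fun a => ((l2.map pvKey).count a : Int))).sum := by
    have h1 := PySem.List.foldl_congr_mem l1 _
        (fun (r : Int) z => r + ((l2.map pvKey).count (pvKey z) : Int))
        (0 : Int) (fun r z _ => hinner r z)
    rw [h1, PySem.List.foldl_add, List.map_map]
    simp [Function.comp_def]
  have hc1 : l1.foldl (fun d z => d.insert (pvKey z) (d.getD (pvKey z) 0 + 1))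
      (PySem.Dict.empty : PySem.Dict (Option Int × Option Int) Int)
      = PySem.Dict.counter (l1.map pvKey) := by
    rw [← PySem.Dict.foldl_insert_getD_add_one_eq_counter, List.foldl_map]
  have hc2 : l2.foldl (fun d x => d.insert (pvKey x) (d.getD (pvKey x) 0 + 1))
      (PySem.Dict.empty : PySem.Dict (Option Int × Option Int) Int)
      = PySem.Dict.counter (l2.map pvKey) := by
    rw [← PySem.Dict.foldl_insert_getD_add_one_eq_counter, List.foldl_map]
  simp only [hc1, hc2]
  have hB : ((PySem.Dict.counter (l1.map pvKey)).items.foldl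
      (fun s p => s + p.2 * (PySem.Dict.counter (l2.map pvKey)).getD p.1 0) (0 : Int))
      = ((PySem.Set.ofList (l1.map pvKey)).map
          (fun k => ((l1.map pvKey).count k : Int) * ((l2.map pvKey).count k : Int))).sum := by
    rw [PySem.List.foldl_add, PySem.Dict.items_counter, List.map_map]
    simp [Function.comp_def, PySem.Dict.getD_counter]
  rw [hA, hB]
  rw [pv_sum_count_mul (l1.map pvKey) (PySem.Set.ofList (l1.map pvKey))
      (fun a => ((l2.map pvKey).count a : Int)) (PySem.Set.nodup_ofList _)
      (fun a ha => (PySem.Set.mem_ofList _ _).mpr ha)]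

-- ===== VERDICT (by name: the statement is the Claim_ definition above) =====
theorem check_belongs_to_spec : Claim_equal_check_belongs_to := by
  intro l1 l2 _ _
  unfold Spec_check_belongs_to
  exact pv_main_eq l1 l2
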